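-- pv_equiv track=rewrite | github.com/PLSE-Lab/Python-MLAPI-expl | python_sources/combine-hero-features-into-team-ones-basic.py | hero_id_subset_analyzer
-- ===== SOURCE A (Python) =====
-- from itertools import combinations
--
-- def hero_id_subset_analyzer(text):
--     # it takes a string of hero ids (like '1 2 5 4 3') as input
--     ids = set()
--     for i in range(1, 4): # we need all subset of lenght 1-3. I think longer combinations are not relevant
--         hero_ids = text.split(' ') # '1 2 5 4 3'-> ['1', '2', '5', '4', '3']
--         hero_ids.sort() # sort them as '1 2 5 4 3' and '3 1 4 5 3' should produce the same set of tokens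
--         combs = set(combinations(hero_ids, i)) # all combinations of length i e.g for 2 are: (1,2), (1,3)... (2,5)... etc
--         ids = ids.union(combs)
--     ids = { "_".join(item) for item in ids} # convert from lists to string e.g. (1,2) -> '1_2'
--     return ids
-- ===== SOURCE B (Python) =====
-- def hero_id_subset_analyzer(text):
--     # single right-to-left pass: combos of length 2/3 are built by extending the
--     # suffix's length-1/2 combos with the new first token (DP), lists kept
--     # back-to-front and reversed once; one final dedup into the result set
--     toks = sorted(text.split(' '))
--     singles_r, pairs_r, triples_r = [], [], []
--     for x in reversed(toks):
--         triples_r += ['_'.join((x, p)) for p in pairs_r]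
--         pairs_r += ['_'.join((x, s)) for s in singles_r]
--         singles_r.append(x)
--     singles_r.reverse(); pairs_r.reverse(); triples_r.reverse()
--     return set(singles_r + pairs_r + triples_r)
-- ===== Notes on version B (the rewrite author's own statement) =====
-- stated objective: faster
-- what changed: B replaces A's three separate itertools.combinations passes (each re-splitting and re-sorting, materializing tuple sets, unioning, then join-mapping) by one right-to-left DP pass that extends the suffix's length-1/2 combos with each new front token, emitting the joined strings directly and deduplicating once.
import Mathlib
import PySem

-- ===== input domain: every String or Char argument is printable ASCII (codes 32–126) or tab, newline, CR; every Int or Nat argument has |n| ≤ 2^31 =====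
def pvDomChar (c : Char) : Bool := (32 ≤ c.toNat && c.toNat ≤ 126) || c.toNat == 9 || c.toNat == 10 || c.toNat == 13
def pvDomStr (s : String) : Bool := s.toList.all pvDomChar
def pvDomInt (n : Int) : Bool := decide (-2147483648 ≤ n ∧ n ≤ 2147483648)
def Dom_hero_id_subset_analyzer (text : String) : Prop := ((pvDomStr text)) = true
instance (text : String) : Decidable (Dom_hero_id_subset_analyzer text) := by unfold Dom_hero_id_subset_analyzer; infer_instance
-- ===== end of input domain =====

-- B replaces A's three itertools.combinations passes (each re-splitting/re-sorting, building
-- tuple sets, unioning, then join-mapping) by ONE right-to-left DP pass that extends the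
-- suffix's length-1/2 combos with each new front token, building the joined strings directly
-- back-to-front (one split/sort and one dedup instead of three of each). Both Pythons return a set (iteration order
-- unspecified); the ports fix first-insertion order.

-- ===== PORT A =====
-- itertools.combinations(xs, n), hand-ported in its exact generation order (lexicographic in positions)
def combosA : Nat → List String → List (List String)
  | 0, _ => [[]]
  | _ + 1, [] => []
  | n + 1, x :: xs => ((combosA n xs).map (fun c => x :: c)) ++ combosA (n + 1) xs

def hero_id_subset_analyzer (text : String) : List String :=
  let ids : PySem.Set (List String) :=
    (PySem.List.pyRange 1 4 1).foldl (fun ids i =>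
      let hero_ids := (PySem.Str.split? text " ").getD []
      let hero_ids := PySem.List.sorted hero_ids (fun x => x) false
      let combs : PySem.Set (List String) := PySem.Set.ofList (combosA i.toNat hero_ids)
      PySem.Set.union ids combs) PySem.Set.empty
  PySem.Set.ofList (ids.map (fun item => PySem.Str.join "_" item))

-- ===== PORT B =====
-- one iteration of Source B's 'for x in reversed(toks)': triples_r += [join((x,p)) for p in pairs_r];
-- pairs_r += [join((x,s)) for s in singles_r]; singles_r.append(x)
def altStep (st : List String × List String × List String) (x : String) :
    List String × List String × List String :=
  (st.1 ++ [x],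
   st.2.1 ++ st.1.map (fun s => PySem.Str.join "_" [x, s]),
   st.2.2 ++ st.2.1.map (fun p => PySem.Str.join "_" [x, p]))

def hero_id_subset_analyzer_alt (text : String) : List String :=
  let toks := PySem.List.sorted ((PySem.Str.split? text " ").getD []) (fun x => x) false
  let st := toks.reverse.foldl altStep ([], [], [])
  -- .reverse() in place, then set(xs ++ ys ++ zs)
  PySem.Set.ofList (st.1.reverse ++ st.2.1.reverse ++ st.2.2.reverse)

-- ===== PRECONDITION & SPEC =====
def Spec_hero_id_subset_analyzer (text : String) (out : List String) : Prop := out = hero_id_subset_analyzer_alt text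
instance (text : String) (out : List String) : Decidable (Spec_hero_id_subset_analyzer text out) := by unfold Spec_hero_id_subset_analyzer; infer_instance

-- ===== CLAIM (what is proved, stated in full; the proofs are below) =====
def Claim_equal_hero_id_subset_analyzer : Prop := ∀ (text : String), Dom_hero_id_subset_analyzer text → Spec_hero_id_subset_analyzer text (hero_id_subset_analyzer text)

-- ===== LEMMAS AND PROOFS =====

-- updating with elements already present is a no-op
theorem pv_update_of_subset {α : Type} [BEq α] [LawfulBEq α] (L : List α) (t : PySem.Set α)
    (h : ∀ x ∈ L, x ∈ t) : PySem.Set.update t L = t := by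
  induction L generalizing t with
  | nil => exact PySem.Set.update_nil t
  | cons a L ih =>
      rw [PySem.Set.update_cons, PySem.Set.add_of_mem (h a (by simp))]
      exact ih t (fun x hx => h x (by simp [hx]))

-- update t with the f-image of an already-deduplicated list = update t with the f-image of the raw list,
-- provided t already holds the f-images of the dedup accumulator s
theorem pv_update_map {α β : Type} [BEq α] [LawfulBEq α] [BEq β] [LawfulBEq β]
    (f : α → β) (D : List α) : ∀ (s : PySem.Set α) (t : PySem.Set β),
    (∀ x ∈ s, f x ∈ t) →
    PySem.Set.update t ((PySem.Set.update s D).map f) = PySem.Set.update t (D.map f) := by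
  induction D with
  | nil =>
      intro s t h
      rw [PySem.Set.update_nil, List.map_nil, PySem.Set.update_nil]
      exact pv_update_of_subset _ t (by intro y hy; obtain ⟨x, hx, rfl⟩ := List.mem_map.mp hy; exact h x hx)
  | cons a D ih =>
      intro s t h
      rw [PySem.Set.update_cons, List.map_cons, PySem.Set.update_cons]
      by_cases ha : a ∈ s
      · rw [PySem.Set.add_of_mem ha, PySem.Set.add_of_mem (h a ha)]
        exact ih s t h
      · rw [PySem.Set.add_of_not_mem ha]
        have h' : ∀ x ∈ s ++ [a], f x ∈ PySem.Set.add t (f a) := by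
          intro x hx
          rcases List.mem_append.mp hx with hx | hx
          · exact (PySem.Set.mem_add _ _ _).mpr (Or.inl (h x hx))
          · simp at hx; subst hx; exact (PySem.Set.mem_add _ _ _).mpr (Or.inr rfl)
        have key := ih (s ++ [a]) (PySem.Set.add t (f a)) h'
        rw [PySem.Set.update_eq_append_filter (s ++ [a]) D] at key ⊢
        rw [List.map_append, PySem.Set.update_append, List.map_append, PySem.Set.update_append] at key ⊢
        rw [pv_update_of_subset (s.map f) t
              (by intro y hy; obtain ⟨x, hx, rfl⟩ := List.mem_map.mp hy; exact h x hx)]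
        rw [pv_update_of_subset (s.map f) (PySem.Set.add t (f a))
              (by intro y hy; obtain ⟨x, hx, rfl⟩ := List.mem_map.mp hy
                  exact (PySem.Set.mem_add _ _ _).mpr (Or.inl (h x hx)))] at key
        have hfa : f a ∈ PySem.Set.add t (f a) := (PySem.Set.mem_add _ _ _).mpr (Or.inr rfl)
        have hadd : PySem.Set.update t ([a].map f) = PySem.Set.add t (f a) := by
          rw [List.map_cons, List.map_nil, PySem.Set.update_cons, PySem.Set.update_nil]
        have hadd2 : PySem.Set.update (PySem.Set.add t (f a)) ([a].map f) = PySem.Set.add t (f a) := by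
          rw [List.map_cons, List.map_nil, PySem.Set.update_cons, PySem.Set.update_nil,
            PySem.Set.add_of_mem hfa]
        rw [hadd2] at key
        rw [hadd]
        exact key

-- id-instance: an inner dedup under an update disappears (s's elements already in t)
theorem pv_update_update {α : Type} [BEq α] [LawfulBEq α] (D : List α) (s t : PySem.Set α)
    (h : ∀ x ∈ s, x ∈ t) :
    PySem.Set.update t (PySem.Set.update s D) = PySem.Set.update t D := by
  have := pv_update_map (fun x => x) D s t (fun x hx => h x hx)
  rwa [List.map_id', List.map_id'] at this

theorem pv_join_one (x : String) : PySem.Str.join "_" [x] = x := by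
  apply String.toList_inj.mp
  simp [PySem.Str.toList_join, PySem.Chars.join_singleton]

theorem combosA_one (t : List String) : combosA 1 t = t.map (fun x => [x]) := by
  induction t with
  | nil => rfl
  | cons x xs ih => simp [combosA, ih]

theorem map_join_combosA_one (t : List String) :
    (combosA 1 t).map (fun c => PySem.Str.join "_" c) = t := by
  rw [combosA_one, List.map_map]
  have : ((fun c => PySem.Str.join "_" c) ∘ fun x => [x]) = fun x : String => x := by
    funext x; exact pv_join_one x
  rw [this, List.map_id']

-- '_'.join((x, s)) = '_'.join([x, s]) folds together: join "_" [x, y::cs] style flattening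
theorem pv_join_pair_cons (x y : String) (cs : List String) :
    PySem.Str.join "_" [x, PySem.Str.join "_" (y :: cs)] = PySem.Str.join "_" (x :: y :: cs) := by
  apply String.toList_inj.mp
  simp [PySem.Str.toList_join, PySem.Chars.join_cons_cons, PySem.Chars.join_singleton]

theorem combosA_ne_nil : ∀ (n : Nat) (xs : List String), ∀ c ∈ combosA (n + 1) xs, c ≠ [] := by
  intro n xs
  induction xs generalizing n with
  | nil => intro c hc; cases hc
  | cons x xs ih =>
      intro c hc
      rcases List.mem_append.mp hc with hc | hc
      · obtain ⟨d, _, rfl⟩ := List.mem_map.mp hc; simp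
      · exact ih n c hc

-- the DP loop invariant: after the right-to-left pass over xs the three accumulators are
-- exactly the reversed length-1/2/3 combination lists (joined), in A's lexicographic order
theorem altLoop_eq (xs : List String) :
    xs.reverse.foldl altStep ([], [], []) =
      (xs.reverse,
       ((combosA 2 xs).map (fun c => PySem.Str.join "_" c)).reverse,
       ((combosA 3 xs).map (fun c => PySem.Str.join "_" c)).reverse) := by
  induction xs with
  | nil => rfl
  | cons x xs ih =>
      rw [List.reverse_cons, List.foldl_append, ih]
      show altStep _ x = _
      unfold altStep
      refine congrArg₂ _ ?_ (congrArg₂ _ ?_ ?_)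
      · simp
      · -- pairs: combosA 2 (x::xs) = (combosA 1 xs).map (x::·) ++ combosA 2 xs
        rw [show combosA 2 (x :: xs) = ((combosA 1 xs).map (fun c => x :: c)) ++ combosA 2 xs from rfl]
        rw [List.map_append, List.reverse_append, combosA_one, List.map_map, List.map_map,
          List.map_reverse]
        rfl
      · -- triples: combosA 3 (x::xs) = (combosA 2 xs).map (x::·) ++ combosA 3 xs
        rw [show combosA 3 (x :: xs) = ((combosA 2 xs).map (fun c => x :: c)) ++ combosA 3 xs from rfl]
        rw [List.map_append, List.reverse_append, List.map_map, List.map_reverse, List.map_map]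
        congr 1
        congr 1
        apply List.map_congr_left
        intro c hc
        obtain ⟨y, cs, rfl⟩ : ∃ y cs, c = y :: cs := by
          cases c with
          | nil => exact absurd rfl (combosA_ne_nil 1 xs [] hc)
          | cons y cs => exact ⟨y, cs, rfl⟩
        simpa using pv_join_pair_cons x y cs

-- ===== VERDICT (by name: the statement is the Claim_ definition above) =====
theorem hero_id_subset_analyzer_spec : Claim_equal_hero_id_subset_analyzer := by
  intro text _
  unfold Spec_hero_id_subset_analyzer hero_id_subset_analyzer hero_id_subset_analyzer_alt
  have hr : PySem.List.pyRange 1 4 1 = [1, 2, 3] := by decide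
  rw [hr]
  simp only [List.foldl, altLoop_eq]
  set T := PySem.List.sorted ((PySem.Str.split? text " ").getD []) (fun x => x) false with hT
  show PySem.Set.ofList
      ((PySem.Set.union
          (PySem.Set.union
            (PySem.Set.union PySem.Set.empty (PySem.Set.ofList (combosA (1 : Int).toNat T)))
            (PySem.Set.ofList (combosA (2 : Int).toNat T)))
          (PySem.Set.ofList (combosA (3 : Int).toNat T))).map (fun item => PySem.Str.join "_" item))
    = PySem.Set.ofList (T.reverse.reverse ++
        ((combosA 2 T).map (fun c => PySem.Str.join "_" c)).reverse.reverse ++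
        ((combosA 3 T).map (fun c => PySem.Str.join "_" c)).reverse.reverse)
  have hnat1 : (1 : Int).toNat = 1 := rfl
  have hnat2 : (2 : Int).toNat = 2 := rfl
  have hnat3 : (3 : Int).toNat = 3 := rfl
  rw [hnat1, hnat2, hnat3, List.reverse_reverse, List.reverse_reverse, List.reverse_reverse]
  have hunion : ∀ (s : PySem.Set (List String)) (L : List (List String)),
      PySem.Set.union s (PySem.Set.ofList L) = PySem.Set.update s L := by
    intro s L
    show PySem.Set.update s (PySem.Set.update PySem.Set.empty L) = PySem.Set.update s L
    exact pv_update_update L PySem.Set.empty s (by intro x hx; cases hx)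
  rw [hunion, hunion, hunion]
  have hids : PySem.Set.update (PySem.Set.update (PySem.Set.update PySem.Set.empty (combosA 1 T)) (combosA 2 T)) (combosA 3 T)
      = PySem.Set.update PySem.Set.empty ((combosA 1 T ++ combosA 2 T) ++ combosA 3 T) := by
    rw [PySem.Set.update_append, PySem.Set.update_append]
  rw [hids]
  have hA : PySem.Set.ofList
      ((PySem.Set.update PySem.Set.empty ((combosA 1 T ++ combosA 2 T) ++ combosA 3 T)).map
        (fun item => PySem.Str.join "_" item))
      = PySem.Set.update PySem.Set.empty
          (((combosA 1 T ++ combosA 2 T) ++ combosA 3 T).map (fun item => PySem.Str.join "_" item)) := by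
    show PySem.Set.update PySem.Set.empty _ = _
    exact pv_update_map (fun item => PySem.Str.join "_" item) _ PySem.Set.empty PySem.Set.empty
      (by intro x hx; cases hx)
  rw [hA]
  rw [List.map_append, List.map_append, map_join_combosA_one, List.append_assoc]
  rfl
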